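-- pv_equiv track=rewrite | github.com/WilliamG-LORA/DSS-NLP-Ingestion | src/lurkers/etnet.py | removeConsecutive
-- ===== SOURCE A (Python) =====
-- from itertools import groupby
-- from string import punctuation
--
-- def removeConsecutive(s):
--     punc = set(punctuation) - set('.')
--
--     newtext = []
--     for k, g in groupby(s):
--         if k in punc:
--             newtext.append(k)
--         else:
--             newtext.extend(g)
--
--     return ''.join(newtext)
-- ===== SOURCE B (Python) =====
-- from string import punctuation
--
-- def removeConsecutive(s):
--     # single pass: skip a char when it is non-dot punctuation equal to the last kept char
--     punc = set(punctuation) - set('.')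
--     out = []
--     for c in s:
--         if c in punc and out and out[-1] == c:
--             continue
--         out.append(c)
--     return ''.join(out)
-- ===== Notes on version B (the rewrite author's own statement) =====
-- stated objective: simpler
-- what changed: Replaces the itertools.groupby run-grouping (build groups, then append key or extend group) with one direct pass that appends each char unless it is non-dot punctuation equal to the last kept char.
import Mathlib
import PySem

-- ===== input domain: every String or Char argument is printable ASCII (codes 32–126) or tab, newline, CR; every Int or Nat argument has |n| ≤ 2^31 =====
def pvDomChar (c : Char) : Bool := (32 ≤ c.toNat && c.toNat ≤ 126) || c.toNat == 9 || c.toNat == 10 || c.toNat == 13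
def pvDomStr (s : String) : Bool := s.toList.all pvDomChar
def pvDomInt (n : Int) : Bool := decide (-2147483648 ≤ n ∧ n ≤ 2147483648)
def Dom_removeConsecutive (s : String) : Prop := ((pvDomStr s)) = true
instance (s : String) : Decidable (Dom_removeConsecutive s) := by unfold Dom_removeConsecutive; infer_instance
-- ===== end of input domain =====

-- B replaces A's itertools.groupby run-grouping with one direct pass comparing each char to the last kept char; objective: simpler.

-- string.punctuation (module constant both versions import)
def pvPunctuation : List Char := "!\"#$%&'()*+,-./:;<=>?@[\\]^_`{|}~".toList

-- ===== PORT A =====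
-- itertools.groupby over a string: list of (key, full run of equal consecutive chars)
def pyGroupby : List Char → List (Char × List Char)
  | [] => []
  | c :: rest =>
      (c, c :: rest.takeWhile (· == c)) :: pyGroupby (rest.dropWhile (· == c))
  termination_by cs => cs.length
  decreasing_by
    simpa using Nat.lt_succ_of_le (List.length_dropWhile_le (· == c) rest)

def removeConsecutive (s : String) : String :=
  -- set(punctuation) - set('.') : membership-identical filter (punctuation chars are distinct)
  let punc := pvPunctuation.filter (· != '.')
  let newtext := (pyGroupby s.toList).foldl
    (fun acc kg => if punc.contains kg.1 then acc ++ [kg.1] else acc ++ kg.2) []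
  String.ofList newtext

-- ===== PORT B =====
def removeConsecutive_alt (s : String) : String :=
  let punc := pvPunctuation.filter (· != '.')
  String.ofList (s.toList.foldl
    (fun out c =>
      if punc.contains c && !out.isEmpty && (PySem.List.pyGet? out (-1) == some c)
      then out else out ++ [c]) [])

-- ===== PRECONDITION & SPEC =====
def Spec_removeConsecutive (s : String) (out : String) : Prop := out = removeConsecutive_alt s
instance (s : String) (out : String) : Decidable (Spec_removeConsecutive s out) := by unfold Spec_removeConsecutive; infer_instance

-- ===== CLAIM (what is proved, stated in full; the proofs are below) =====
def Claim_equal_removeConsecutive : Prop := ∀ (s : String), Dom_removeConsecutive s → Spec_removeConsecutive s (removeConsecutive s)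

-- ===== LEMMAS AND PROOFS =====

-- abbreviations for the proof: the shared punctuation test and the two loop bodies
def pvP (c : Char) : Bool := (pvPunctuation.filter (· != '.')).contains c

def pvStepB (out : List Char) (c : Char) : List Char :=
  if pvP c && !out.isEmpty && (PySem.List.pyGet? out (-1) == some c) then out else out ++ [c]

def pvFoldB (out : List Char) (cs : List Char) : List Char := cs.foldl pvStepB out

def pvA (cs : List Char) : List Char :=
  (pyGroupby cs).foldl (fun acc kg => if pvP kg.1 then acc ++ [kg.1] else acc ++ kg.2) []

lemma pyGet_neg_one (xs : List Char) : PySem.List.pyGet? xs (-1) = xs.getLast? := by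
  simp [PySem.List.pyGet?, PySem.List.pyIdx?]
  rcases xs with _ | ⟨a, t⟩
  · simp
  · simp [List.getLast?_eq_getElem?]

lemma head?_dropWhile_false (p : Char → Bool) (l : List Char) (x : Char)
    (h : (l.dropWhile p).head? = some x) : p x = false := by
  have hne : l.dropWhile p ≠ [] := by intro e; simp [e] at h
  have h2 := List.head_dropWhile_not p hne
  have h3 : (l.dropWhile p).head hne = x := by
    have := List.head?_eq_some_head hne
    rw [this] at h; exact Option.some.inj h
  rw [h3] at h2
  simpa using h2

lemma stepB_cond (out : List Char) (c : Char) :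
    pvStepB out c = if pvP c ∧ out.getLast? = some c then out else out ++ [c] := by
  unfold pvStepB
  rw [pyGet_neg_one]
  rcases hL : out.getLast? with _ | a
  · have : out = [] := by simpa using List.getLast?_eq_none_iff.mp hL
    subst this; simp
  · have hne : out.isEmpty = false := by
      rcases out with _ | _ <;> simp_all
    by_cases hp : pvP c = true
    · by_cases hac : a = c
      · subst hac; simp [hp, hne]
      · simp [hp, hne, hac]
    · simp [hp, hne]

lemma stepB_ne (out : List Char) (c : Char) (h : ¬(pvP c = true ∧ out.getLast? = some c)) :
    pvStepB out c = out ++ [c] := by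
  rw [stepB_cond, if_neg h]

lemma foldB_drop (acc : List Char) (c : Char) (hP : pvP c = true) (hL : acc.getLast? = some c) :
    ∀ g, (∀ x ∈ g, x = c) → pvFoldB acc g = acc := by
  intro g
  induction g with
  | nil => intro _; rfl
  | cons x t ih =>
      intro hg
      have hx : x = c := hg x (by simp)
      subst hx
      have hstep : pvStepB acc x = acc := by
        rw [stepB_cond, if_pos ⟨hP, hL⟩]
      show pvFoldB (pvStepB acc x) t = acc
      rw [hstep]
      exact ih (fun y hy => hg y (by simp [hy]))

lemma foldB_keep (c : Char) (hP : pvP c = false) :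
    ∀ g acc, (∀ x ∈ g, x = c) → pvFoldB acc g = acc ++ g := by
  intro g
  induction g with
  | nil => intro acc _; simp [pvFoldB]
  | cons x t ih =>
      intro acc hg
      have hx : x = c := hg x (by simp)
      have hstep : pvStepB acc x = acc ++ [x] := by
        apply stepB_ne; rintro ⟨h1, _⟩; rw [hx, hP] at h1; cases h1
      show pvFoldB (pvStepB acc x) t = acc ++ x :: t
      rw [hstep, ih (acc ++ [x]) (fun y hy => hg y (by simp [hy]))]
      simp

lemma pvA_eq_flatMap (cs : List Char) :
    pvA cs = (pyGroupby cs).flatMap (fun kg => if pvP kg.1 then [kg.1] else kg.2) := by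
  unfold pvA
  have h : ∀ (l : List (Char × List Char)) (init : List Char),
      l.foldl (fun acc kg => if pvP kg.1 then acc ++ [kg.1] else acc ++ kg.2) init
        = init ++ l.flatMap (fun kg => if pvP kg.1 then [kg.1] else kg.2) := by
    intro l
    induction l with
    | nil => intro init; simp
    | cons kg t ih =>
        intro init
        show List.foldl _ (if pvP kg.1 then init ++ [kg.1] else init ++ kg.2) t = _
        rw [ih]
        by_cases hp : pvP kg.1 = true <;> simp [hp]
  simpa using h (pyGroupby cs) []

lemma pvA_cons (c : Char) (rest : List Char) :
    pvA (c :: rest) = (if pvP c then [c] else c :: rest.takeWhile (· == c))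
      ++ pvA (rest.dropWhile (· == c)) := by
  have hgb : pyGroupby (c :: rest)
      = (c, c :: rest.takeWhile (· == c)) :: pyGroupby (rest.dropWhile (· == c)) := by
    rw [pyGroupby]
  rw [pvA_eq_flatMap, pvA_eq_flatMap, hgb]
  by_cases hp : pvP c = true <;> simp [hp]

lemma getLast?_all_eq (c : Char) (acc : List Char) :
    ∀ g, (∀ x ∈ g, x = c) → (acc ++ c :: g).getLast? = some c := by
  intro g
  induction g generalizing acc with
  | nil => intro _; simp
  | cons x t ih =>
      intro hg
      have hx : x = c := hg x (by simp)
      have h2 := ih (acc ++ [c]) (fun y hy => hg y (by simp [hy]))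
      rw [hx]
      simpa using h2

lemma main_lemma : ∀ n (cs acc : List Char), cs.length ≤ n →
    (∀ h, cs.head? = some h → ¬(pvP h = true ∧ acc.getLast? = some h)) →
    pvFoldB acc cs = acc ++ pvA cs := by
  intro n
  induction n with
  | zero =>
      intro cs acc hlen _
      have : cs = [] := List.eq_nil_of_length_eq_zero (Nat.le_zero.mp hlen)
      subst this
      simp [pvFoldB, pvA, pyGroupby]
  | succ n ih =>
      intro cs acc hlen hQ
      rcases cs with _ | ⟨c, rest⟩
      · simp [pvFoldB, pvA, pyGroupby]
      · have hQc := hQ c (by simp)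
        set g := rest.takeWhile (· == c) with hg
        set rest' := rest.dropWhile (· == c) with hrest'
        have hsplit : rest = g ++ rest' := (List.takeWhile_append_dropWhile).symm
        have hgc : ∀ x ∈ g, x = c := by
          intro x hx
          have := List.mem_takeWhile_imp hx
          simpa using this
        have hlen' : rest'.length ≤ n := by
          have h1 : rest'.length ≤ rest.length := List.length_dropWhile_le _ _
          have h2 : rest.length ≤ n := by simpa using Nat.succ_le_succ_iff.mp hlen
          omega
        have hhead : ∀ h, rest'.head? = some h → (h == c) = false := fun h hh =>
          head?_dropWhile_false (· == c) rest h hh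
        have hstep1 : pvStepB acc c = acc ++ [c] := stepB_ne acc c hQc
        have hfold : pvFoldB acc (c :: rest) = pvFoldB (pvFoldB (acc ++ [c]) g) rest' := by
          show pvFoldB (pvStepB acc c) rest = _
          rw [hstep1, hsplit]
          simp [pvFoldB, List.foldl_append]
        by_cases hp : pvP c = true
        · -- punctuation: the rest of the run is dropped
          have hdrop : pvFoldB (acc ++ [c]) g = acc ++ [c] :=
            foldB_drop (acc ++ [c]) c hp (by simp) g hgc
          have hQ' : ∀ h, rest'.head? = some h → ¬(pvP h = true ∧ (acc ++ [c]).getLast? = some h) := by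
            rintro h hh ⟨_, hl⟩
            have hc : c = h := by simpa using hl
            have h1 := hhead h hh
            simp [← hc] at h1
          rw [hfold, hdrop, ih rest' (acc ++ [c]) hlen' hQ', pvA_cons, hp]
          simp
          rw [hrest']
        · -- not punctuation: the whole run is kept
          have hp' : pvP c = false := by simpa using hp
          have hkeep : pvFoldB (acc ++ [c]) g = acc ++ [c] ++ g :=
            foldB_keep c hp' g (acc ++ [c]) hgc
          have hlast : (acc ++ [c] ++ g).getLast? = some c := by
            have := getLast?_all_eq c acc g hgc
            simpa using this
          have hQ' : ∀ h, rest'.head? = some h → ¬(pvP h = true ∧ (acc ++ [c] ++ g).getLast? = some h) := by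
            rintro h hh ⟨_, hl⟩
            rw [hlast] at hl
            have hc : c = h := by simpa using hl
            have h1 := hhead h hh
            simp [← hc] at h1
          rw [hfold, hkeep, ih rest' (acc ++ [c] ++ g) hlen' hQ', pvA_cons, hp']
          simp
          rw [hg, hrest']
  -- end main_lemma

-- ===== VERDICT (by name: the statement is the Claim_ definition above) =====
theorem removeConsecutive_spec : Claim_equal_removeConsecutive := by
  intro s _
  unfold Spec_removeConsecutive removeConsecutive removeConsecutive_alt
  have h := main_lemma s.toList.length s.toList [] le_rfl
    (by rintro h _ ⟨_, hl⟩; simp at hl)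
  simp only [List.nil_append] at h
  show String.ofList (pvA s.toList) = String.ofList (pvFoldB [] s.toList)
  rw [h]
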